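-- pv_equiv track=rewrite | github.com/lucas-albuq/URI---Python | ad-hoc/2451.py | max_comida
-- ===== SOURCE A (Python) =====
-- def max_comida(tabuleiro, N):
--   max_comida = 0
--   comida = 0
--   direcao = 1
--   j = 0
--   for _ in range(N):
--     j = 0 if direcao == 1 else N-1
--     while 0 <= j < N:
--       if tabuleiro[_][j] == 'o':
--         comida +=1
--       elif tabuleiro[_][j] == 'A':
--         max_comida = max(max_comida, comida)
--         comida = 0
--       j+= direcao
--     direcao *= -1
--   return max(max_comida, comida)
-- ===== SOURCE B (Python) =====
-- def max_comida(tabuleiro, N):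
--     # stage 1: flatten the grid in snake order (odd-indexed rows reversed)
--     seq = []
--     for i in range(N):
--         row = tabuleiro[i][:N]
--         seq += row if i % 2 == 0 else row[::-1]
--     # stage 2: segment-wise — append a sentinel 'A' to close the final segment,
--     # then repeatedly jump to the next 'A' and count the 'o's of the whole
--     # segment with list.count; no per-character running counter, no resets.
--     seq = seq + ['A']
--     best = start = 0
--     while start < len(seq):
--         i = seq.index('A', start)
--         best = max(best, seq[start:i].count('o'))
--         start = i + 1
--     return best
-- ===== Notes on version B (the rewrite author's own statement) =====
-- stated objective: alternative
-- what changed: A walks the grid cell by cell with a direction variable, incrementing a running food counter and resetting it on each 'A'; B first flattens the grid into the snake-order sequence, appends a sentinel 'A', and then processes it segment by segment: jump to the next 'A' with list.index and take the count of 'o' in the whole segment slice, keeping only the maximum segment count.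
import Mathlib
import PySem

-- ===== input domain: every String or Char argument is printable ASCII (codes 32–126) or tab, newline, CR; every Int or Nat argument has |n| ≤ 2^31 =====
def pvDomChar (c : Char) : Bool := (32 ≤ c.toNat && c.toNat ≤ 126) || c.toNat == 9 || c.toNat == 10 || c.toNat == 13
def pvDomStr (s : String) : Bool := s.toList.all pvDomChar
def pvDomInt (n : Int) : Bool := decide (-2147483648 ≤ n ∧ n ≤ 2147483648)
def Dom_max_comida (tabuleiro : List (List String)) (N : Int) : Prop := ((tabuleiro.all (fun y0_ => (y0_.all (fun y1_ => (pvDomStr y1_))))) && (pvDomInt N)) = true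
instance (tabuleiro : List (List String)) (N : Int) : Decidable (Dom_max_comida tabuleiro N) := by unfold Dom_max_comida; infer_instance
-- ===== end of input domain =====

-- B replaces A's direction-variable cell-by-cell counter walk by two stages: flatten the grid
-- into the snake-order sequence (odd rows reversed), then process it segment by segment —
-- sentinel 'A', jump to the next 'A' with index, count the 'o's of each whole segment, keep the max.


-- ===== PORT A =====
-- inner 'while 0 <= j < N' loop; fuel = N.toNat always suffices (j walks monotonically)
def pvWhileA (N : Int) (row : List String) : Nat → Int → Int → Int → Int → Int × Int
  | 0, _, _, maxc, comida => (maxc, comida)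
  | fuel+1, j, direcao, maxc, comida =>
    if 0 ≤ j ∧ j < N then
      let cell := (PySem.List.pyGet? row j).getD ""
      if cell == "o" then pvWhileA N row fuel (j + direcao) direcao maxc (comida + 1)
      else if cell == "A" then pvWhileA N row fuel (j + direcao) direcao (max maxc comida) 0
      else pvWhileA N row fuel (j + direcao) direcao maxc comida
    else (maxc, comida)

def max_comida (tabuleiro : List (List String)) (N : Int) : Int :=
  let st := (List.range N.toNat).foldl (fun (st : Int × Int × Int) (i : Nat) =>
    let maxc := st.1; let comida := st.2.1; let direcao := st.2.2
    let j : Int := if direcao == 1 then 0 else N - 1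
    let row := (PySem.List.pyGet? tabuleiro (i : Int)).getD []
    let p := pvWhileA N row N.toNat j direcao maxc comida
    (p.1, p.2, direcao * (-1))) (0, 0, 1)
  max st.1 st.2.1

-- ===== PORT B =====
-- one snake-order row: tabuleiro[i][:N], reversed when i is odd
def pvChunk (tabuleiro : List (List String)) (N : Int) (i : Nat) : List String :=
  let row := PySem.List.slice ((PySem.List.pyGet? tabuleiro (i : Int)).getD []) none (some N)
  if i % 2 == 0 then row else row.reverse

-- the 'while start < len(seq)' loop of Source B; fuel is a totality device (start strictly grows).
-- seq.index('A', start) is ported as start + (first index of "A" in seq.drop start): exact, and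
-- the sentinel guarantees the none branch (Python's ValueError) is never reached.
def pvBestLoop : Nat → List String → Nat → Int → Int
  | 0, _, _, best => best
  | fuel+1, seq, start, best =>
    if start < seq.length then
      match PySem.List.index? (seq.drop start) "A" with
      | some k =>
        pvBestLoop fuel seq (start + k + 1)
          (max best (PySem.List.count ((seq.drop start).take k) "o"))
      | none => best   -- unreachable with the sentinel
    else best

def max_comida_alt (tabuleiro : List (List String)) (N : Int) : Int :=
  let seq := (List.range N.toNat).foldl (fun acc i => acc ++ pvChunk tabuleiro N i) []
  let seq2 := seq ++ ["A"]
  pvBestLoop (seq2.length + 1) seq2 0 0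

-- ===== PRECONDITION & SPEC =====
-- A indexes tabuleiro[i][j] for i in range(N), j in range(N): Pre_ demands at least N rows
-- and at least N cells in each of the first N rows (otherwise A raises IndexError).
def Pre_max_comida (tabuleiro : List (List String)) (N : Int) : Prop :=
  N ≤ (tabuleiro.length : Int) ∧ ∀ row ∈ tabuleiro.take N.toNat, N ≤ (row.length : Int)
instance (tabuleiro : List (List String)) (N : Int) : Decidable (Pre_max_comida tabuleiro N) := by
  unfold Pre_max_comida; infer_instance

def pvWitness_max_comida : List (List String) × Int :=
  ([["o", "A", "o"], [".", "o", "o"], ["A", ".", "o"]], 3)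

def Spec_max_comida (tabuleiro : List (List String)) (N : Int) (out : Int) : Prop := out = max_comida_alt tabuleiro N
instance (tabuleiro : List (List String)) (N : Int) (out : Int) : Decidable (Spec_max_comida tabuleiro N out) := by unfold Spec_max_comida; infer_instance

-- ===== CLAIM (what is proved, stated in full; the proofs are below) =====
def Claim_equal_max_comida : Prop := ∀ (tabuleiro : List (List String)) (N : Int), Dom_max_comida tabuleiro N → Pre_max_comida tabuleiro N → Spec_max_comida tabuleiro N (max_comida tabuleiro N)

-- ===== LEMMAS AND PROOFS =====

-- proof-side bridge: A's running counter/reset walk over a sequence, as a fold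
def pvScan (cells : List String) (st : Int × Int) : Int × Int :=
  cells.foldl (fun p c =>
    if c == "o" then (p.1, p.2 + 1)
    else if c == "A" then (max p.1 p.2, 0)
    else p) st

theorem pvScan_cons (c : String) (cs : List String) (st : Int × Int) :
    pvScan (c :: cs) st =
      pvScan cs (if c == "o" then (st.1, st.2 + 1)
                 else if c == "A" then (max st.1 st.2, 0) else st) := by
  simp [pvScan]

theorem pvScan_append (a b : List String) (st : Int × Int) :
    pvScan (a ++ b) st = pvScan b (pvScan a st) := by
  simp [pvScan]

-- forward sweep: direcao = 1 from j scans row[j:N]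
theorem pvWhileA_fwd (fuel : Nat) : ∀ (row : List String) (N j maxc comida : Int),
    0 ≤ j → N ≤ (row.length : Int) → (N - j).toNat ≤ fuel →
    pvWhileA N row fuel j 1 maxc comida =
      pvScan ((row.drop j.toNat).take (N - j).toNat) (maxc, comida) := by
  induction fuel with
  | zero =>
    intro row N j maxc comida hj hlen hf
    have : (N - j).toNat = 0 := by omega
    simp [pvWhileA, this, pvScan]
  | succ fuel ih =>
    intro row N j maxc comida hj hlen hf
    by_cases hlt : j < N
    · have hjl : j.toNat < row.length := by omega
      have hcell : (PySem.List.pyGet? row j).getD "" = row[j.toNat] := by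
        rw [PySem.List.pyGet?_eq_some_getElem row hj (by omega)]; rfl
      have hdrop : row.drop j.toNat = row[j.toNat] :: row.drop (j.toNat + 1) :=
        List.drop_eq_getElem_cons hjl
      have htn : (N - j).toNat = (N - (j + 1)).toNat + 1 := by omega
      have hjn : (j + 1).toNat = j.toNat + 1 := by omega
      have hseg : (row.drop j.toNat).take (N - j).toNat =
          row[j.toNat] :: ((row.drop (j + 1).toNat).take (N - (j + 1)).toNat) := by
        rw [hdrop, htn, hjn, List.take_succ_cons]
      rw [hseg, pvScan_cons]
      have hstep : pvWhileA N row (fuel + 1) j 1 maxc comida =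
          (if row[j.toNat] == "o" then pvWhileA N row fuel (j + 1) 1 maxc (comida + 1)
           else if row[j.toNat] == "A" then pvWhileA N row fuel (j + 1) 1 (max maxc comida) 0
           else pvWhileA N row fuel (j + 1) 1 maxc comida) := by
        simp only [pvWhileA, hcell, if_pos (And.intro hj hlt)]
      rw [hstep]
      by_cases h1 : row[j.toNat] == "o"
      · simp only [h1, if_pos]
        exact ih row N (j + 1) maxc (comida + 1) (by omega) hlen (by omega)
      · by_cases h2 : row[j.toNat] == "A"
        · simp only [h1, h2, if_neg, if_pos, Bool.false_eq_true, not_false_eq_true]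
          exact ih row N (j + 1) (max maxc comida) 0 (by omega) hlen (by omega)
        · simp only [h1, h2, Bool.false_eq_true, if_neg, not_false_eq_true]
          exact ih row N (j + 1) maxc comida (by omega) hlen (by omega)
    · have : (N - j).toNat = 0 := by omega
      simp [pvWhileA, hlt, this, pvScan]

-- backward sweep: direcao = -1 from j scans (row[:j+1]) reversed
theorem pvWhileA_bwd (fuel : Nat) : ∀ (row : List String) (N j maxc comida : Int),
    j < N → N ≤ (row.length : Int) → (j + 1).toNat ≤ fuel →
    pvWhileA N row fuel j (-1) maxc comida =
      pvScan ((row.take (j + 1).toNat).reverse) (maxc, comida) := by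
  induction fuel with
  | zero =>
    intro row N j maxc comida hj hlen hf
    have : (j + 1).toNat = 0 := by omega
    simp [pvWhileA, this, pvScan]
  | succ fuel ih =>
    intro row N j maxc comida hj hlen hf
    by_cases hge : 0 ≤ j
    · have hjl : j.toNat < row.length := by omega
      have hcell : (PySem.List.pyGet? row j).getD "" = row[j.toNat] := by
        rw [PySem.List.pyGet?_eq_some_getElem row hge (by omega)]; rfl
      have hjn : (j + 1).toNat = j.toNat + 1 := by omega
      have hseg : (row.take (j + 1).toNat).reverse =
          row[j.toNat] :: (row.take j.toNat).reverse := by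
        rw [hjn, List.take_add_one, List.getElem?_eq_getElem hjl]
        simp
      rw [hseg, pvScan_cons]
      have hstep : pvWhileA N row (fuel + 1) j (-1) maxc comida =
          (if row[j.toNat] == "o" then pvWhileA N row fuel (j + -1) (-1) maxc (comida + 1)
           else if row[j.toNat] == "A" then pvWhileA N row fuel (j + -1) (-1) (max maxc comida) 0
           else pvWhileA N row fuel (j + -1) (-1) maxc comida) := by
        simp only [pvWhileA, hcell, if_pos (And.intro hge hj)]
      rw [hstep]
      have hseg2 : (row.take j.toNat).reverse = (row.take (j + -1 + 1).toNat).reverse := by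
        congr 1; congr 1; omega
      rw [hseg2]
      by_cases h1 : row[j.toNat] == "o"
      · simp only [h1, if_pos]
        exact ih row N (j + -1) maxc (comida + 1) (by omega) hlen (by omega)
      · by_cases h2 : row[j.toNat] == "A"
        · simp only [h1, h2, Bool.false_eq_true, if_neg, if_pos, not_false_eq_true]
          exact ih row N (j + -1) (max maxc comida) 0 (by omega) hlen (by omega)
        · simp only [h1, h2, Bool.false_eq_true, if_neg, not_false_eq_true]
          exact ih row N (j + -1) maxc comida (by omega) hlen (by omega)
    · have : (j + 1).toNat = 0 := by omega
      have hcond : ¬ (0 ≤ j ∧ j < N) := by omega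
      simp [pvWhileA, hcond, this, pvScan]

-- the flat snake sequence after the first k rows
def pvSeq (tabuleiro : List (List String)) (N : Int) (k : Nat) : List String :=
  (List.range k).foldl (fun acc i => acc ++ pvChunk tabuleiro N i) []

theorem pvSeq_succ (tabuleiro : List (List String)) (N : Int) (k : Nat) :
    pvSeq tabuleiro N (k + 1) = pvSeq tabuleiro N k ++ pvChunk tabuleiro N k := by
  simp [pvSeq, List.range_succ]

-- the outer invariant: A's fold state after k rows = scan of the flat prefix, direction = parity of k
theorem pvOuter (tabuleiro : List (List String)) (N : Int)
    (hlen : N ≤ (tabuleiro.length : Int))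
    (hrows : ∀ row ∈ tabuleiro.take N.toNat, N ≤ (row.length : Int)) :
    ∀ k : Nat, k ≤ N.toNat →
    (List.range k).foldl (fun (st : Int × Int × Int) (i : Nat) =>
      let maxc := st.1; let comida := st.2.1; let direcao := st.2.2
      let j : Int := if direcao == 1 then 0 else N - 1
      let row := (PySem.List.pyGet? tabuleiro (i : Int)).getD []
      let p := pvWhileA N row N.toNat j direcao maxc comida
      (p.1, p.2, direcao * (-1))) (0, 0, 1) =
    ((pvScan (pvSeq tabuleiro N k) (0, 0)).1, (pvScan (pvSeq tabuleiro N k) (0, 0)).2,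
      if k % 2 == 0 then 1 else -1) := by
  intro k
  induction k with
  | zero => intro _; simp [pvSeq, pvScan]
  | succ k ih =>
    intro hk
    have hkN : k < N.toNat := by omega
    have hNpos : 1 ≤ N := by omega
    have hkt : (k : Int) < tabuleiro.length := by omega
    have hktl : k < tabuleiro.length := by omega
    have hrowget : (PySem.List.pyGet? tabuleiro (k : Int)).getD [] = tabuleiro[k] := by
      rw [PySem.List.pyGet?_natCast, List.getElem?_eq_getElem hktl]; rfl
    have hrowlen : N ≤ (tabuleiro[k].length : Int) := by
      have hmem : tabuleiro[k] ∈ tabuleiro.take N.toNat := by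
        have : (tabuleiro.take N.toNat)[k]'(by simp; omega) = tabuleiro[k] :=
          List.getElem_take
        rw [← this]; exact List.getElem_mem _
      exact hrows _ hmem
    have hslice : PySem.List.slice tabuleiro[k] none (some N) = tabuleiro[k].take N.toNat :=
      PySem.List.slice_to _ (by omega)
    rw [List.range_succ, List.foldl_append, ih (by omega), pvSeq_succ, pvScan_append]
    simp only [List.foldl_cons, List.foldl_nil, hrowget]
    by_cases hpar : k % 2 == 0
    · -- even row: forward
      have hfwd := pvWhileA_fwd N.toNat tabuleiro[k] N 0 (pvScan (pvSeq tabuleiro N k) (0, 0)).1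
        (pvScan (pvSeq tabuleiro N k) (0, 0)).2 (le_refl 0) hrowlen (by omega)
      have hsucc : ((k + 1) % 2 == 0) = false := by
        rw [beq_eq_false_iff_ne]; simp only [beq_iff_eq] at hpar; omega
      rw [pvChunk, hrowget, hslice]
      simp [hpar, hsucc, hfwd]
    · -- odd row: backward
      have hbwd := pvWhileA_bwd N.toNat tabuleiro[k] N (N - 1) (pvScan (pvSeq tabuleiro N k) (0, 0)).1
        (pvScan (pvSeq tabuleiro N k) (0, 0)).2 (by omega) hrowlen (by omega)
      have htn : (N - 1 + 1).toNat = N.toNat := by omega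
      rw [htn] at hbwd
      have hsucc : ((k + 1) % 2 == 0) = true := by
        simp only [beq_iff_eq] at hpar ⊢; omega
      rw [pvChunk, hrowget, hslice]
      simp [hpar, hsucc, hbwd]

-- proof-side: the best segment count of a sequence (segments separated by "A")
def pvSegMax (s : List String) : Int :=
  match h : PySem.List.index? s "A" with
  | some k => max (PySem.List.count (s.take k) "o" : Int) (pvSegMax (s.drop (k + 1)))
  | none => (PySem.List.count s "o" : Int)
termination_by s.length
decreasing_by
  obtain ⟨hk, -, -⟩ := PySem.List.getElem_of_index?_eq_some h
  simp; omega

theorem pvSegMax_some {s : List String} {k : Nat} (h : PySem.List.index? s "A" = some k) :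
    pvSegMax s = max (PySem.List.count (s.take k) "o" : Int) (pvSegMax (s.drop (k + 1))) := by
  rw [pvSegMax]
  split
  · next k' h' => rw [h] at h'; cases h'; rfl
  · next h' => rw [h] at h'; cases h'

theorem pvSegMax_none {s : List String} (h : PySem.List.index? s "A" = none) :
    pvSegMax s = (PySem.List.count s "o" : Int) := by
  rw [pvSegMax]
  split
  · next k' h' => rw [h] at h'; cases h'
  · next h' => rfl

-- pvSegMax with the food already collected inside the (open) first segment
def pvSegMaxW (c : Int) (s : List String) : Int :=
  match PySem.List.index? s "A" with
  | some k => max (c + (PySem.List.count (s.take k) "o" : Int)) (pvSegMax (s.drop (k + 1)))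
  | none => c + (PySem.List.count s "o" : Int)

theorem pvSegMax_eq (s : List String) : pvSegMax s = pvSegMaxW 0 s := by
  cases h : PySem.List.index? s "A" with
  | none => rw [pvSegMax_none h]; simp only [pvSegMaxW, h]; ring
  | some k => rw [pvSegMax_some h]; simp only [pvSegMaxW, h]; ring_nf

theorem pvIndex?_nil : PySem.List.index? ([] : List String) "A" = none :=
  (PySem.List.index?_eq_none_iff _ _).mpr (by simp)

theorem pvSegMaxW_nil (c : Int) : pvSegMaxW c [] = c := by
  simp only [pvSegMaxW, pvIndex?_nil]
  simp [PySem.List.count_eq]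

theorem pvCount_cons (x : String) (xs : List String) (v : String) :
    PySem.List.count (x :: xs) v = PySem.List.count xs v + if x == v then 1 else 0 := by
  simp [PySem.List.count_eq, List.count_cons]

theorem pvSegMaxW_cons_A (c : Int) (xs : List String) :
    pvSegMaxW c ("A" :: xs) = max c (pvSegMax xs) := by
  simp only [pvSegMaxW, PySem.List.index?_cons_self, List.take_zero, List.drop_succ_cons,
    List.drop_zero]
  simp [PySem.List.count_eq]

theorem pvSegMaxW_cons_ne (c : Int) (x : String) (xs : List String) (hx : x ≠ "A") :
    pvSegMaxW c (x :: xs) = pvSegMaxW (c + if x == "o" then 1 else 0) xs := by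
  cases h : PySem.List.index? xs "A" with
  | none =>
    have h2 : PySem.List.index? (x :: xs) "A" = none := by
      rw [PySem.List.index?_cons_of_ne xs hx, h]; rfl
    simp only [pvSegMaxW, h2, h, pvCount_cons]
    by_cases ho : x == "o" <;> simp [ho] <;> try ring
  | some k =>
    have h2 : PySem.List.index? (x :: xs) "A" = some (k + 1) := by
      rw [PySem.List.index?_cons_of_ne xs hx, h]; rfl
    simp only [pvSegMaxW, h2, h, List.take_succ_cons, List.drop_succ_cons, pvCount_cons]
    by_cases ho : x == "o" <;> simp [ho] <;> try ring_nf

-- A's scan = best segment count (with open segment c and best-so-far m)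
theorem pvScan_eq_segMax (s : List String) : ∀ (m c : Int),
    max (pvScan s (m, c)).1 (pvScan s (m, c)).2 = max m (pvSegMaxW c s) := by
  induction s with
  | nil => intro m c; simp [pvScan, pvSegMaxW_nil]
  | cons x xs ih =>
    intro m c
    rw [pvScan_cons]
    by_cases h1 : x == "o"
    · have hx : x ≠ "A" := by simp only [beq_iff_eq] at h1; simp [h1]
      simp only [h1, if_pos]
      rw [ih m (c + 1), pvSegMaxW_cons_ne c x xs hx]
      simp [h1]
    · by_cases h2 : x == "A"
      · have hxA : x = "A" := by simpa using h2
        simp only [h1, h2, Bool.false_eq_true, if_neg, if_pos, not_false_eq_true]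
        rw [ih (max m c) 0, hxA, pvSegMaxW_cons_A, ← pvSegMax_eq, max_assoc]
      · have hx : x ≠ "A" := by simpa using h2
        simp only [h1, h2, Bool.false_eq_true, if_neg, not_false_eq_true]
        rw [ih m c, pvSegMaxW_cons_ne c x xs hx]
        simp [h1]

theorem pvBestLoop_done (fuel : Nat) (seq : List String) (start : Nat) (b : Int)
    (h : ¬ start < seq.length) : pvBestLoop fuel seq start b = b := by
  cases fuel with
  | zero => rfl
  | succ fuel => simp [pvBestLoop, h]

-- B's loop over s ++ [sentinel] computes max b (pvSegMax of the unprocessed suffix)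
theorem pvBestLoop_eq (fuel : Nat) : ∀ (s : List String) (start : Nat) (b : Int),
    start ≤ s.length → s.length + 2 - start ≤ fuel →
    pvBestLoop fuel (s ++ ["A"]) start b = max b (pvSegMax (s.drop start)) := by
  induction fuel with
  | zero => intro s start b h1 h2; omega
  | succ fuel ih =>
    intro s start b h1 h2
    have hstart : start < (s ++ ["A"]).length := by simp; omega
    have hdrop : (s ++ ["A"]).drop start = s.drop start ++ ["A"] :=
      List.drop_append_of_le_length h1
    rw [pvBestLoop, if_pos hstart, hdrop]
    cases hidx : PySem.List.index? (s.drop start) "A" with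
    | some k =>
      have hmem : "A" ∈ s.drop start :=
        (PySem.List.index?_isSome_iff _ _).mp (by rw [hidx]; rfl)
      obtain ⟨hk, -, -⟩ := PySem.List.getElem_of_index?_eq_some hidx
      have hkd : k < s.length - start := by simpa using hk
      have h2i : PySem.List.index? (s.drop start ++ ["A"]) "A" = some k := by
        rw [PySem.List.index?_append_of_mem _ hmem, hidx]
      simp only [h2i]
      have htake : (s.drop start ++ ["A"]).take k = (s.drop start).take k :=
        List.take_append_of_le_length (by omega)
      rw [htake, ih s (start + k + 1) _ (by omega) (by omega)]
      rw [pvSegMax_some hidx]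
      have hdd : (s.drop start).drop (k + 1) = s.drop (start + k + 1) := by
        rw [List.drop_drop, ← Nat.add_assoc]
      rw [hdd, max_assoc]
    | none =>
      have hnmem : "A" ∉ s.drop start := (PySem.List.index?_eq_none_iff _ _).mp hidx
      have h2i : PySem.List.index? (s.drop start ++ ["A"]) "A" = some (s.drop start).length :=
        PySem.List.index?_append_singleton_self _ _ hnmem
      simp only [h2i]
      have htake : (s.drop start ++ ["A"]).take (s.drop start).length = s.drop start := by
        rw [List.take_append_of_le_length (le_refl _), List.take_length]
      rw [htake]
      rw [pvBestLoop_done _ _ _ _ (by simp; omega)]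
      rw [pvSegMax_none hidx]

-- ===== VERDICT (by name: the statement is the Claim_ definition above) =====
theorem max_comida_spec : Claim_equal_max_comida := by
  intro tabuleiro N _ hpre
  unfold Spec_max_comida max_comida max_comida_alt
  rcases hpre with ⟨hlen, hrows⟩
  rw [pvOuter tabuleiro N hlen hrows N.toNat (le_refl _)]
  show max (pvScan (pvSeq tabuleiro N N.toNat) (0, 0)).1
        (pvScan (pvSeq tabuleiro N N.toNat) (0, 0)).2
      = pvBestLoop ((pvSeq tabuleiro N N.toNat ++ ["A"]).length + 1)
          (pvSeq tabuleiro N N.toNat ++ ["A"]) 0 0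
  rw [pvScan_eq_segMax,
    pvBestLoop_eq ((pvSeq tabuleiro N N.toNat ++ ["A"]).length + 1)
      (pvSeq tabuleiro N N.toNat) 0 0 (Nat.zero_le _) (by simp)]
  rw [List.drop_zero, pvSegMax_eq]
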